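-- pv_equiv track=rewrite | github.com/maheenfs/blocking-v5-code-release | runner/pipeline.py | active_job_ordinal
-- ===== SOURCE A (Python) =====
-- from typing import Callable, Dict, List, Optional
--
-- def active_job_ordinal(rows: List[Dict[str, object]]) -> int:
--     """Return the 1-based active job number in batch order."""
--     for index, row in enumerate(rows, start=1):
--         if row.get("status") == "running":
--             return int(index)
--     completed = sum(1 for row in rows if row.get("status") == "completed")
--     if completed:
--         return min(int(completed), len(rows))
--     return 0
-- ===== SOURCE B (Python) =====
-- def active_job_ordinal(rows):
--     """Single pass: remember the first running index and count completed as we go."""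
--     running_index = None
--     completed = 0
--     for index, row in enumerate(rows, start=1):
--         status = row.get("status")
--         if status == "running" and running_index is None:
--             running_index = index
--         elif status == "completed":
--             completed += 1
--     if running_index is not None:
--         return running_index
--     if completed:
--         return min(completed, len(rows))
--     return 0
-- ===== Notes on version B (the rewrite author's own statement) =====
-- stated objective: alternative
-- what changed: Replaces A's two passes (an early-return scan for 'running' plus a separate generator-sum over all rows counting 'completed') by a single fold that maintains the first running index and the completed count simultaneously.
import Mathlib
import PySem

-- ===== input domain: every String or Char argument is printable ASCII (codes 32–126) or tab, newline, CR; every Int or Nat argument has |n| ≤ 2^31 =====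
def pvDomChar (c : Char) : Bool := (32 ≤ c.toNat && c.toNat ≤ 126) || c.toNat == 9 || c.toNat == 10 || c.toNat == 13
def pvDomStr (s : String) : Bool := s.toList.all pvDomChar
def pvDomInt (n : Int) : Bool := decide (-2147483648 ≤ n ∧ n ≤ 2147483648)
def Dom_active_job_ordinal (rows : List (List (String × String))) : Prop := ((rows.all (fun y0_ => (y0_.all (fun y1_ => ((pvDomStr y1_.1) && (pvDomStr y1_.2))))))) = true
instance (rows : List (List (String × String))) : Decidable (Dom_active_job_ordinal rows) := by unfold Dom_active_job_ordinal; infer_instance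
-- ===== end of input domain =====

-- B replaces A's two passes (early-return running scan + separate completed sum) by one fold carrying both; alternative decomposition, same cost.


-- ===== PORT A =====
-- dict.get on the assoc-list encoding = first match = List.lookup
-- the first for-loop of A: 1-based index of the first row whose status is "running"
def ajoFindRunning (i : Int) (rows : List (List (String × String))) : Option Int :=
  match rows with
  | [] => none
  | r :: rest =>
    if r.lookup "status" = some "running" then some i
    else ajoFindRunning (i + 1) rest

def active_job_ordinal (rows : List (List (String × String))) : Int :=
  match ajoFindRunning 1 rows with
  | some i => i
  | none =>
    let completed : Int :=
      ((rows.filter (fun r => r.lookup "status" = some "completed")).length : Int)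
    if completed ≠ 0 then min completed (rows.length : Int) else 0

-- ===== PORT B =====
-- one step of B's single loop: state = (next 1-based index, first running index, completed count)
def ajoStep (st : Int × Option Int × Int) (r : List (String × String)) :
    Int × Option Int × Int :=
  let s := r.lookup "status"
  if s = some "running" ∧ st.2.1 = none then (st.1 + 1, some st.1, st.2.2)
  else if s = some "completed" then (st.1 + 1, st.2.1, st.2.2 + 1)
  else (st.1 + 1, st.2.1, st.2.2)

def active_job_ordinal_alt (rows : List (List (String × String))) : Int :=
  let st := rows.foldl ajoStep (1, none, 0)
  match st.2.1 with
  | some i => i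
  | none => if st.2.2 ≠ 0 then min st.2.2 (rows.length : Int) else 0

-- ===== PRECONDITION & SPEC =====
def Spec_active_job_ordinal (rows : List (List (String × String))) (out : Int) : Prop := out = active_job_ordinal_alt rows
instance (rows : List (List (String × String))) (out : Int) : Decidable (Spec_active_job_ordinal rows out) := by unfold Spec_active_job_ordinal; infer_instance

-- ===== CLAIM (what is proved, stated in full; the proofs are below) =====
def Claim_equal_active_job_ordinal : Prop := ∀ (rows : List (List (String × String))), Dom_active_job_ordinal rows → Spec_active_job_ordinal rows (active_job_ordinal rows)

-- ===== LEMMAS AND PROOFS =====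

-- once the running index is set, the fold never changes it
theorem ajoStep_keep (rows : List (List (String × String))) :
    ∀ (i j c : Int), (rows.foldl ajoStep (i, some j, c)).2.1 = some j := by
  induction rows with
  | nil => intro i j c; rfl
  | cons r rest ih =>
    intro i j c
    simp only [List.foldl_cons, ajoStep]
    split_ifs <;> first | exact ih _ _ _ | simp_all

-- the fold from a clean state computes A's two passes at once
theorem ajoFold_spec (rows : List (List (String × String))) :
    ∀ (i c : Int),
      (rows.foldl ajoStep (i, none, c)).2.1 = ajoFindRunning i rows ∧
      (ajoFindRunning i rows = none →
        (rows.foldl ajoStep (i, none, c)).2.2 =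
          c + ((rows.filter (fun r => r.lookup "status" = some "completed")).length : Int)) := by
  induction rows with
  | nil => intro i c; simp [ajoFindRunning]
  | cons r rest ih =>
    intro i c
    by_cases hrun : r.lookup "status" = some "running"
    · have hstep : ajoStep (i, none, c) r = (i + 1, some i, c) := by
        simp [ajoStep, hrun]
      have hfind : ajoFindRunning i (r :: rest) = some i := by
        simp [ajoFindRunning, hrun]
      refine ⟨?_, ?_⟩
      · rw [List.foldl_cons, hstep, hfind]; exact ajoStep_keep rest (i + 1) i c
      · rw [hfind]; intro h; cases h
    · have hfind : ajoFindRunning i (r :: rest) = ajoFindRunning (i + 1) rest := by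
        simp [ajoFindRunning, hrun]
      by_cases hcomp : r.lookup "status" = some "completed"
      · have hstep : ajoStep (i, none, c) r = (i + 1, none, c + 1) := by
          simp [ajoStep, hcomp]
        rw [List.foldl_cons, hstep, hfind]
        refine ⟨(ih (i + 1) (c + 1)).1, fun h => ?_⟩
        rw [(ih (i + 1) (c + 1)).2 h]
        simp [hcomp]
        ring
      · have hstep : ajoStep (i, none, c) r = (i + 1, none, c) := by
          simp [ajoStep, hrun, hcomp]
        rw [List.foldl_cons, hstep, hfind]
        refine ⟨(ih (i + 1) c).1, fun h => ?_⟩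
        rw [(ih (i + 1) c).2 h]
        simp [hcomp]

-- ===== VERDICT (by name: the statement is the Claim_ definition above) =====
theorem active_job_ordinal_spec : Claim_equal_active_job_ordinal := by
  intro rows _
  unfold Spec_active_job_ordinal active_job_ordinal active_job_ordinal_alt
  obtain ⟨h1, h2⟩ := ajoFold_spec rows 1 0
  cases hfind : ajoFindRunning 1 rows with
  | some j =>
    rw [hfind] at h1
    simp only [h1]
  | none =>
    rw [hfind] at h1
    have hc := h2 hfind
    simp only [h1, hc]
    norm_num
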